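-- pv_equiv track=rewrite | github.com/Fardan-Ali/Water-Sort-Solver | WaterSortSolver.py | best_moves
-- ===== SOURCE A (Python) =====
-- def valid_moves_function(current_state):
--
--     valid_move_list = []
--     source_tube_id = -1 # tracks the index of the source tube
--
--     for source_tube in current_state:
--         source_tube_id += 1
--         target_tube_id = -1 # tracks the index of the target tube
--         for target_tube in current_state:
--             target_tube_id += 1
--             # check if the tubes are different and source is not empty
--             if source_tube and source_tube_id!=target_tube_id:
--                 # if the target is empty, ensure the source is not a single colour (redundant move)
--                 # if the target is not empty, ensure it is not full and the top fluid is the same colour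
--                 if (not target_tube and source_tube[-1][1] != sum(v for _, v in source_tube)) or (target_tube and source_tube[-1][0]==target_tube[-1][0] and sum(v for _, v in target_tube) <= 3):
--                         # add a tuple with the source and target to the valid moves list
--                         valid_move_list.append((source_tube_id, target_tube_id))
--     return valid_move_list
--
-- def best_moves(current_state):
--     best_moves_list = [] # list to store moves from worst to best
--     possible_moves = valid_moves_function(current_state) # receives list of possible moves
--
--     #ADD THE WORST MOVES FIRST AND THE BETTER MOVES LATER SO THAT THE BEST MOVES ARE AT THE END OF THE LIST
--
--     # Worst move is when all the liquid will not fit in the tube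
--     for move in possible_moves:
--         if current_state[move[0]][-1][1] + sum(v for _, v in current_state[move[1]]) > 4:
--             best_moves_list.append(move)
--     possible_moves = [item for item in possible_moves if item not in best_moves_list]
--
--     # Next worst move is pouring into an empty tube
--     for move in possible_moves:
--         if not current_state[move[1]]:
--             best_moves_list.append(move)
--     possible_moves = [item for item in possible_moves if item not in best_moves_list]
--
--     # Next worst move is when pouring does not result in completing a colour
--     for move in possible_moves:
--         if current_state[move[0]][-1][1] + current_state[move[1]][-1][1] < 4:
--             best_moves_list.append(move)
--     possible_moves = [item for item in possible_moves if item not in best_moves_list]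
--
--     # Remaining possibilities are those which lead to a completed colour
--     if possible_moves:
--         for move in possible_moves:
--             best_moves_list.append(move)
--     return best_moves_list
-- ===== SOURCE B (Python) =====
-- def best_moves(current_state):
--     def priority(move):
--         src, tgt = current_state[move[0]], current_state[move[1]]
--         if src[-1][1] + sum(v for _, v in tgt) > 4:
--             return 0
--         if not tgt:
--             return 1
--         if src[-1][1] + tgt[-1][1] < 4:
--             return 2
--         return 3
--
--     moves = [(s, t)
--              for s, src in enumerate(current_state) if src
--              for t, tgt in enumerate(current_state)
--              if s != t
--              if ((not tgt and src[-1][1] != sum(v for _, v in src))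
--                  or (tgt and src[-1][0] == tgt[-1][0] and sum(v for _, v in tgt) <= 3))]
--     return sorted(moves, key=priority)
-- ===== Notes on version B (the rewrite author's own statement) =====
-- stated objective: idiomatic
-- what changed: A builds the ordered move list with four sequential append passes, each followed by a rebuild of the remaining list via 'item not in best_moves_list' scans; B computes one priority key (0-3) per move and returns sorted(moves, key=priority), relying on sort stability to reproduce A's within-category order, and generates the valid moves with an enumerate-based comprehension instead of manual index counters.
import Mathlib
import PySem

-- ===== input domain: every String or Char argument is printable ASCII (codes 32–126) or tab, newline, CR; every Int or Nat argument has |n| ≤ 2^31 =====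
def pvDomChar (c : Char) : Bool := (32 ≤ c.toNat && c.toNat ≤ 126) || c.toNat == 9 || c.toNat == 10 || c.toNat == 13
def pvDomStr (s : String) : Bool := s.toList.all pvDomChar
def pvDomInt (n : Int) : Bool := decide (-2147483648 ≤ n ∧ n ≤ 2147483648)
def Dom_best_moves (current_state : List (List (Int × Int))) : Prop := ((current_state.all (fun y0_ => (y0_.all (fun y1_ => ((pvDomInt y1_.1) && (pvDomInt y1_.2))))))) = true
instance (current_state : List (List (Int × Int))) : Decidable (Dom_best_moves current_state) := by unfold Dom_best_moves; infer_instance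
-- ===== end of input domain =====

-- B replaces A's four append-then-filter passes (with their linear `item not in list` scans) by one
-- priority key per move and a single stable sort; the valid-move nested loop becomes a comprehension.

-- ===== PORT A =====
-- A-side helpers: the two loop bodies of valid_moves_function, named so the folds can be reasoned about
def pvA_inner_step (source_tube : List (Int × Int)) (source_tube_id : Int)
    (st2 : List (Int × Int) × Int) (target_tube : List (Int × Int)) : List (Int × Int) × Int :=
  let target_tube_id := st2.2 + 1
  if source_tube ≠ [] ∧ source_tube_id ≠ target_tube_id then
    if (target_tube = [] ∧ (PySem.List.pyGetD source_tube (-1) (0, 0)).2 ≠ (source_tube.map Prod.snd).sum)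
        ∨ (target_tube ≠ [] ∧ (PySem.List.pyGetD source_tube (-1) (0, 0)).1 = (PySem.List.pyGetD target_tube (-1) (0, 0)).1
            ∧ (target_tube.map Prod.snd).sum ≤ 3) then
      (st2.1 ++ [(source_tube_id, target_tube_id)], target_tube_id)
    else (st2.1, target_tube_id)
  else (st2.1, target_tube_id)

def pvA_outer_step (current_state : List (List (Int × Int)))
    (st : List (Int × Int) × Int) (source_tube : List (Int × Int)) : List (Int × Int) × Int :=
  let source_tube_id := st.2 + 1
  ((current_state.foldl (pvA_inner_step source_tube source_tube_id) (st.1, -1)).1, source_tube_id)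

def valid_moves_function (current_state : List (List (Int × Int))) : List (Int × Int) :=
  (current_state.foldl (pvA_outer_step current_state) (([], -1) : List (Int × Int) × Int)).1

def best_moves (current_state : List (List (Int × Int))) : List (Int × Int) :=
  let best_moves_list : List (Int × Int) := []
  let possible_moves := valid_moves_function current_state
  -- worst: liquid will not fit
  let best_moves_list := possible_moves.foldl (fun acc move =>
    if (PySem.List.pyGetD (PySem.List.pyGetD current_state move.1 []) (-1) (0, 0)).2
        + ((PySem.List.pyGetD current_state move.2 []).map Prod.snd).sum > 4 then acc ++ [move] else acc) best_moves_list
  let possible_moves := possible_moves.filter (fun item => !decide (item ∈ best_moves_list))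
  -- next worst: pouring into an empty tube
  let best_moves_list := possible_moves.foldl (fun acc move =>
    if PySem.List.pyGetD current_state move.2 [] = [] then acc ++ [move] else acc) best_moves_list
  let possible_moves := possible_moves.filter (fun item => !decide (item ∈ best_moves_list))
  -- next worst: pouring does not complete a colour
  let best_moves_list := possible_moves.foldl (fun acc move =>
    if (PySem.List.pyGetD (PySem.List.pyGetD current_state move.1 []) (-1) (0, 0)).2
        + (PySem.List.pyGetD (PySem.List.pyGetD current_state move.2 []) (-1) (0, 0)).2 < 4 then acc ++ [move] else acc) best_moves_list
  let possible_moves := possible_moves.filter (fun item => !decide (item ∈ best_moves_list))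
  -- remaining: moves completing a colour
  if possible_moves ≠ [] then
    possible_moves.foldl (fun acc move => acc ++ [move]) best_moves_list
  else best_moves_list

-- ===== PORT B =====
-- B-side helpers: the priority key and the valid-move comprehension of Source B
def pv_priority (current_state : List (List (Int × Int))) (move : Int × Int) : Int :=
  let src := PySem.List.pyGetD current_state move.1 []
  let tgt := PySem.List.pyGetD current_state move.2 []
  if (PySem.List.pyGetD src (-1) (0, 0)).2 + (tgt.map Prod.snd).sum > 4 then 0
  else if tgt = [] then 1
  else if (PySem.List.pyGetD src (-1) (0, 0)).2 + (PySem.List.pyGetD tgt (-1) (0, 0)).2 < 4 then 2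
  else 3

def pvMoves (current_state : List (List (Int × Int))) : List (Int × Int) :=
  (PySem.List.enumerate current_state 0).flatMap (fun p =>
    if p.2 ≠ [] then
      ((PySem.List.enumerate current_state 0).filter (fun q =>
        decide (p.1 ≠ q.1) &&
        decide ((q.2 = [] ∧ (PySem.List.pyGetD p.2 (-1) (0, 0)).2 ≠ (p.2.map Prod.snd).sum)
          ∨ (q.2 ≠ [] ∧ (PySem.List.pyGetD p.2 (-1) (0, 0)).1 = (PySem.List.pyGetD q.2 (-1) (0, 0)).1
              ∧ (q.2.map Prod.snd).sum ≤ 3)))).map (fun q => (p.1, q.1))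
    else [])

def best_moves_alt (current_state : List (List (Int × Int))) : List (Int × Int) :=
  PySem.List.sorted (pvMoves current_state) (pv_priority current_state) false

-- ===== PRECONDITION & SPEC =====
def Spec_best_moves (current_state : List (List (Int × Int))) (out : List (Int × Int)) : Prop := out = best_moves_alt current_state
instance (current_state : List (List (Int × Int))) (out : List (Int × Int)) : Decidable (Spec_best_moves current_state out) := by unfold Spec_best_moves; infer_instance

-- ===== CLAIM (what is proved, stated in full; the proofs are below) =====
def Claim_equal_best_moves : Prop := ∀ (current_state : List (List (Int × Int))), Dom_best_moves current_state → Spec_best_moves current_state (best_moves current_state)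

-- ===== LEMMAS AND PROOFS =====

-- the pour condition of both programs, as a predicate on (source tube, target tube)
def pvCond (src tgt : List (Int × Int)) : Bool :=
  decide ((tgt = [] ∧ (PySem.List.pyGetD src (-1) (0, 0)).2 ≠ (src.map Prod.snd).sum)
    ∨ (tgt ≠ [] ∧ (PySem.List.pyGetD src (-1) (0, 0)).1 = (PySem.List.pyGetD tgt (-1) (0, 0)).1
        ∧ (tgt.map Prod.snd).sum ≤ 3))
theorem pvA_inner_fold (src : List (Int × Int)) (sid : Int) (L : List (List (Int × Int)))
    (acc : List (Int × Int)) (t0 : Int) :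
    L.foldl (pvA_inner_step src sid) (acc, t0)
    = (acc ++ (if src ≠ [] then
        ((PySem.List.enumerate L (t0 + 1)).filter (fun q => decide (sid ≠ q.1) && pvCond src q.2)).map
          (fun q => (sid, q.1))
      else []), t0 + L.length) := by
  induction L generalizing acc t0 with
  | nil => simp [PySem.List.enumerate]
  | cons x L ih =>
    rw [List.foldl_cons]
    have hstep : pvA_inner_step src sid (acc, t0) x =
        (acc ++ (if src ≠ [] ∧ sid ≠ t0 + 1 ∧ pvCond src x then [(sid, t0 + 1)] else []), t0 + 1) := by
      simp only [pvA_inner_step]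
      split_ifs with h1 h2 h3 h4 h5 <;> simp_all [pvCond]
      rcases h4.2.2 with ⟨hx0, hx1⟩ | ⟨hx0, hx1, hx2⟩
      · exact hx1 (h2.1 hx0)
      · exact absurd (h2.2 hx0 hx1) (by omega)
    rw [hstep, ih]
    rw [PySem.List.enumerate_cons]
    by_cases hs : src = []
    · simp [hs]; omega
    · by_cases ht : sid = t0 + 1 <;> by_cases hc : pvCond src x = true <;>
        simp [hs, ht, hc] <;> omega

theorem pvA_outer_fold (cs : List (List (Int × Int))) (M : List (List (Int × Int)))
    (acc : List (Int × Int)) (s0 : Int) :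
    M.foldl (pvA_outer_step cs) (acc, s0)
    = (acc ++ (PySem.List.enumerate M (s0 + 1)).flatMap (fun p =>
        if p.2 ≠ [] then
          ((PySem.List.enumerate cs 0).filter (fun q => decide (p.1 ≠ q.1) && pvCond p.2 q.2)).map
            (fun q => (p.1, q.1))
        else []), s0 + M.length) := by
  induction M generalizing acc s0 with
  | nil => simp [PySem.List.enumerate]
  | cons x M ih =>
    rw [List.foldl_cons]
    have hstep : pvA_outer_step cs (acc, s0) x =
        (acc ++ (if x ≠ [] then
            ((PySem.List.enumerate cs 0).filter (fun q => decide ((s0+1) ≠ q.1) && pvCond x q.2)).map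
              (fun q => (s0 + 1, q.1))
          else []), s0 + 1) := by
      simp only [pvA_outer_step]
      rw [pvA_inner_fold]
      norm_num
    rw [hstep, ih, PySem.List.enumerate_cons]
    rw [List.flatMap_cons]
    simp only [List.append_assoc]
    rw [Prod.mk.injEq]
    exact ⟨rfl, by push_cast [List.length_cons]; ring⟩

theorem pvA_valid_eq (cs : List (List (Int × Int))) : valid_moves_function cs = pvMoves cs := by
  unfold valid_moves_function pvMoves
  rw [pvA_outer_fold]
  norm_num [pvCond]

theorem pv_insertBy_split {α : Type} (before : α → α → Bool) (x : α) (u v : List α)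
    (hu : ∀ y ∈ u, before x y = false) (hv : ∀ y ∈ v, before x y = true) :
    PySem.List.insertBy before x (u ++ v) = u ++ x :: v := by
  induction u with
  | nil =>
    cases v with
    | nil => simp [PySem.List.insertBy]
    | cons y ys => simp [PySem.List.insertBy, hv y (by simp)]
  | cons z u ih =>
    have hz : before x z = false := hu z (by simp)
    simp only [List.cons_append, PySem.List.insertBy, hz]
    simp only [Bool.false_eq_true, if_false, List.cons.injEq, true_and]
    exact ih (fun y hy => hu y (by simp [hy]))

theorem pv_insertBy_skip {α : Type} (before : α → α → Bool) (x : α) (u v : List α)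
    (hu : ∀ y ∈ u, before x y = false) :
    PySem.List.insertBy before x (u ++ v) = u ++ PySem.List.insertBy before x v := by
  induction u with
  | nil => simp
  | cons z u ih =>
    have hz : before x z = false := hu z (by simp)
    simp only [List.cons_append, PySem.List.insertBy, hz]
    simp only [Bool.false_eq_true, if_false, List.cons.injEq, true_and]
    exact ih (fun y hy => hu y (by simp [hy]))

theorem pv_sorted_four {α : Type} (key : α → Int) (xs : List α)
    (h : ∀ x ∈ xs, key x = 0 ∨ key x = 1 ∨ key x = 2 ∨ key x = 3) :
    PySem.List.sorted xs key false =
      xs.filter (fun x => decide (key x = 0)) ++ xs.filter (fun x => decide (key x = 1))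
        ++ xs.filter (fun x => decide (key x = 2)) ++ xs.filter (fun x => decide (key x = 3)) := by
  rw [PySem.List.sorted_eq_foldl_insertBy]
  induction xs using List.reverseRecOn with
  | nil => simp
  | append_singleton xs x ih =>
    rw [List.foldl_append, List.foldl_cons, List.foldl_nil]
    rw [ih (fun y hy => h y (by simp [hy]))]
    have hmem : ∀ (i : Int) (y : α), y ∈ xs.filter (fun z => decide (key z = i)) → key y = i := by
      intro i y hy
      simpa using (List.mem_filter.mp hy).2
    have hx := h x (by simp)
    have hins : ∀ (v : List α), (∀ y ∈ v, decide (key x < key y) = true) →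
        PySem.List.insertBy (fun a b => decide (key a < key b)) x v = x :: v := by
      intro v hv
      simpa using pv_insertBy_split (fun a b => decide (key a < key b)) x [] v (by simp) hv
    simp only [List.filter_append, List.filter_singleton, List.append_assoc]
    rcases hx with hx | hx | hx | hx
    · rw [pv_insertBy_skip _ _ _ _ (by intro y hy; have := hmem 0 y hy; simp [this, hx])]
      rw [hins _ (by
        intro y hy
        simp only [List.mem_append] at hy
        rcases hy with hy | hy | hy
        · have := hmem 1 y hy; simp [this, hx]
        · have := hmem 2 y hy; simp [this, hx]
        · have := hmem 3 y hy; simp [this, hx])]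
      simp [hx]
    · rw [pv_insertBy_skip _ _ _ _ (by intro y hy; have := hmem 0 y hy; simp [this, hx])]
      rw [pv_insertBy_skip _ _ _ _ (by intro y hy; have := hmem 1 y hy; simp [this, hx])]
      rw [hins _ (by
        intro y hy
        simp only [List.mem_append] at hy
        rcases hy with hy | hy
        · have := hmem 2 y hy; simp [this, hx]
        · have := hmem 3 y hy; simp [this, hx])]
      simp [hx]
    · rw [pv_insertBy_skip _ _ _ _ (by intro y hy; have := hmem 0 y hy; simp [this, hx])]
      rw [pv_insertBy_skip _ _ _ _ (by intro y hy; have := hmem 1 y hy; simp [this, hx])]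
      rw [pv_insertBy_skip _ _ _ _ (by intro y hy; have := hmem 2 y hy; simp [this, hx])]
      rw [hins _ (by intro y hy; have := hmem 3 y hy; simp [this, hx])]
      simp [hx]
    · rw [pv_insertBy_skip _ _ _ _ (by intro y hy; have := hmem 0 y hy; simp [this, hx])]
      rw [pv_insertBy_skip _ _ _ _ (by intro y hy; have := hmem 1 y hy; simp [this, hx])]
      rw [pv_insertBy_skip _ _ _ _ (by intro y hy; have := hmem 2 y hy; simp [this, hx])]
      rw [PySem.List.insertBy_of_forall_not_before _ _ _ (by intro y hy; have := hmem 3 y hy; simp [this, hx])]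
      simp [hx]

theorem pv_pipeline (V : List (Int × Int)) (P0 P1 P2 : (Int × Int) → Prop)
    [DecidablePred P0] [DecidablePred P1] [DecidablePred P2] :
    (let b1 : List (Int × Int) := [];
     let b1 := V.foldl (fun acc m => if P0 m then acc ++ [m] else acc) b1;
     let p1 := V.filter (fun item => !decide (item ∈ b1));
     let b2 := p1.foldl (fun acc m => if P1 m then acc ++ [m] else acc) b1;
     let p2 := p1.filter (fun item => !decide (item ∈ b2));
     let b3 := p2.foldl (fun acc m => if P2 m then acc ++ [m] else acc) b2;
     let p3 := p2.filter (fun item => !decide (item ∈ b3));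
     if p3 ≠ [] then p3.foldl (fun acc m => acc ++ [m]) b3 else b3)
    = V.filter (fun m => decide (P0 m))
      ++ (V.filter (fun m => !decide (P0 m))).filter (fun m => decide (P1 m))
      ++ ((V.filter (fun m => !decide (P0 m))).filter (fun m => !decide (P1 m))).filter (fun m => decide (P2 m))
      ++ ((V.filter (fun m => !decide (P0 m))).filter (fun m => !decide (P1 m))).filter (fun m => !decide (P2 m)) := by
  simp only [PySem.List.foldl_append_ite_eq_filter, List.nil_append,
    PySem.List.foldl_append_singleton_eq_self]
  have h1 : V.filter (fun item => !decide (item ∈ V.filter (fun m => decide (P0 m))))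
      = V.filter (fun m => !decide (P0 m)) := by
    refine List.filter_congr ?_
    intro x hx
    simp [List.mem_filter, hx]
  rw [h1]
  have h2 : (V.filter (fun m => !decide (P0 m))).filter
      (fun item => !decide (item ∈ V.filter (fun m => decide (P0 m))
        ++ (V.filter (fun m => !decide (P0 m))).filter (fun m => decide (P1 m))))
      = (V.filter (fun m => !decide (P0 m))).filter (fun m => !decide (P1 m)) := by
    refine List.filter_congr ?_
    intro x hx
    have hx' := List.mem_filter.mp hx
    have h0 : decide (P0 x) = false := by simpa using hx'.2
    simp [List.mem_append, List.mem_filter, hx'.1, h0]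
  rw [h2]
  have h3 : ((V.filter (fun m => !decide (P0 m))).filter (fun m => !decide (P1 m))).filter
      (fun item => !decide (item ∈ (V.filter (fun m => decide (P0 m))
        ++ (V.filter (fun m => !decide (P0 m))).filter (fun m => decide (P1 m)))
        ++ ((V.filter (fun m => !decide (P0 m))).filter (fun m => !decide (P1 m))).filter (fun m => decide (P2 m))))
      = ((V.filter (fun m => !decide (P0 m))).filter (fun m => !decide (P1 m))).filter (fun m => !decide (P2 m)) := by
    refine List.filter_congr ?_
    intro x hx
    have hx1 := List.mem_filter.mp hx
    have hx2 := List.mem_filter.mp hx1.1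
    have h0 : decide (P0 x) = false := by simpa using hx2.2
    have h1' : decide (P1 x) = false := by simpa using hx1.2
    simp [List.mem_append, List.mem_filter, hx2.1]
    simp [h0, h1']
  rw [h3]
  by_cases hp : ((V.filter (fun m => !decide (P0 m))).filter (fun m => !decide (P1 m))).filter (fun m => !decide (P2 m)) = []
  · simp
  · simp [List.append_assoc]

theorem pv_key_range (cs : List (List (Int × Int))) (m : Int × Int) :
    pv_priority cs m = 0 ∨ pv_priority cs m = 1 ∨ pv_priority cs m = 2 ∨ pv_priority cs m = 3 := by
  unfold pv_priority
  dsimp only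
  split_ifs <;> simp

theorem best_moves_eq (cs : List (List (Int × Int))) : best_moves cs = best_moves_alt cs := by
  have hrest : (valid_moves_function cs).filter (fun m => decide
        ((PySem.List.pyGetD (PySem.List.pyGetD cs m.1 []) (-1) (0, 0)).2
          + ((PySem.List.pyGetD cs m.2 []).map Prod.snd).sum > 4))
      ++ ((valid_moves_function cs).filter (fun m => !decide
        ((PySem.List.pyGetD (PySem.List.pyGetD cs m.1 []) (-1) (0, 0)).2
          + ((PySem.List.pyGetD cs m.2 []).map Prod.snd).sum > 4))).filter
        (fun m => decide (PySem.List.pyGetD cs m.2 [] = []))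
      ++ (((valid_moves_function cs).filter (fun m => !decide
        ((PySem.List.pyGetD (PySem.List.pyGetD cs m.1 []) (-1) (0, 0)).2
          + ((PySem.List.pyGetD cs m.2 []).map Prod.snd).sum > 4))).filter
        (fun m => !decide (PySem.List.pyGetD cs m.2 [] = []))).filter
        (fun m => decide ((PySem.List.pyGetD (PySem.List.pyGetD cs m.1 []) (-1) (0, 0)).2
          + (PySem.List.pyGetD (PySem.List.pyGetD cs m.2 []) (-1) (0, 0)).2 < 4))
      ++ (((valid_moves_function cs).filter (fun m => !decide
        ((PySem.List.pyGetD (PySem.List.pyGetD cs m.1 []) (-1) (0, 0)).2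
          + ((PySem.List.pyGetD cs m.2 []).map Prod.snd).sum > 4))).filter
        (fun m => !decide (PySem.List.pyGetD cs m.2 [] = []))).filter
        (fun m => !decide ((PySem.List.pyGetD (PySem.List.pyGetD cs m.1 []) (-1) (0, 0)).2
          + (PySem.List.pyGetD (PySem.List.pyGetD cs m.2 []) (-1) (0, 0)).2 < 4))
      = best_moves_alt cs := by
    rw [pvA_valid_eq cs]
    unfold best_moves_alt
    rw [pv_sorted_four (pv_priority cs) (pvMoves cs) (fun m _ => pv_key_range cs m)]
    have e0 : (pvMoves cs).filter (fun m => decide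
          ((PySem.List.pyGetD (PySem.List.pyGetD cs m.1 []) (-1) (0, 0)).2
            + ((PySem.List.pyGetD cs m.2 []).map Prod.snd).sum > 4))
        = (pvMoves cs).filter (fun x => decide (pv_priority cs x = 0)) := by
      refine List.filter_congr ?_
      intro m _
      unfold pv_priority
      dsimp only
      split_ifs <;> simp_all
    have e1 : ((pvMoves cs).filter (fun m => !decide
          ((PySem.List.pyGetD (PySem.List.pyGetD cs m.1 []) (-1) (0, 0)).2
            + ((PySem.List.pyGetD cs m.2 []).map Prod.snd).sum > 4))).filter
          (fun m => decide (PySem.List.pyGetD cs m.2 [] = []))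
        = (pvMoves cs).filter (fun x => decide (pv_priority cs x = 1)) := by
      rw [List.filter_filter]
      refine List.filter_congr ?_
      intro m _
      unfold pv_priority
      dsimp only
      split_ifs <;> simp_all
    have e2 : (((pvMoves cs).filter (fun m => !decide
          ((PySem.List.pyGetD (PySem.List.pyGetD cs m.1 []) (-1) (0, 0)).2
            + ((PySem.List.pyGetD cs m.2 []).map Prod.snd).sum > 4))).filter
          (fun m => !decide (PySem.List.pyGetD cs m.2 [] = []))).filter
          (fun m => decide ((PySem.List.pyGetD (PySem.List.pyGetD cs m.1 []) (-1) (0, 0)).2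
            + (PySem.List.pyGetD (PySem.List.pyGetD cs m.2 []) (-1) (0, 0)).2 < 4))
        = (pvMoves cs).filter (fun x => decide (pv_priority cs x = 2)) := by
      rw [List.filter_filter, List.filter_filter]
      refine List.filter_congr ?_
      intro m _
      unfold pv_priority
      dsimp only
      split_ifs <;> simp_all
    have e3 : (((pvMoves cs).filter (fun m => !decide
          ((PySem.List.pyGetD (PySem.List.pyGetD cs m.1 []) (-1) (0, 0)).2
            + ((PySem.List.pyGetD cs m.2 []).map Prod.snd).sum > 4))).filter
          (fun m => !decide (PySem.List.pyGetD cs m.2 [] = []))).filter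
          (fun m => !decide ((PySem.List.pyGetD (PySem.List.pyGetD cs m.1 []) (-1) (0, 0)).2
            + (PySem.List.pyGetD (PySem.List.pyGetD cs m.2 []) (-1) (0, 0)).2 < 4))
        = (pvMoves cs).filter (fun x => decide (pv_priority cs x = 3)) := by
      rw [List.filter_filter, List.filter_filter]
      refine List.filter_congr ?_
      intro m _
      unfold pv_priority
      dsimp only
      split_ifs <;> simp_all
    rw [e0, e1, e2, e3]
  have h := pv_pipeline (valid_moves_function cs)
    (fun m => (PySem.List.pyGetD (PySem.List.pyGetD cs m.1 []) (-1) (0, 0)).2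
      + ((PySem.List.pyGetD cs m.2 []).map Prod.snd).sum > 4)
    (fun m => PySem.List.pyGetD cs m.2 [] = [])
    (fun m => (PySem.List.pyGetD (PySem.List.pyGetD cs m.1 []) (-1) (0, 0)).2
      + (PySem.List.pyGetD (PySem.List.pyGetD cs m.2 []) (-1) (0, 0)).2 < 4)
  have hA : best_moves cs = (valid_moves_function cs).filter (fun m => decide
        ((PySem.List.pyGetD (PySem.List.pyGetD cs m.1 []) (-1) (0, 0)).2
          + ((PySem.List.pyGetD cs m.2 []).map Prod.snd).sum > 4))
      ++ ((valid_moves_function cs).filter (fun m => !decide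
        ((PySem.List.pyGetD (PySem.List.pyGetD cs m.1 []) (-1) (0, 0)).2
          + ((PySem.List.pyGetD cs m.2 []).map Prod.snd).sum > 4))).filter
        (fun m => decide (PySem.List.pyGetD cs m.2 [] = []))
      ++ (((valid_moves_function cs).filter (fun m => !decide
        ((PySem.List.pyGetD (PySem.List.pyGetD cs m.1 []) (-1) (0, 0)).2
          + ((PySem.List.pyGetD cs m.2 []).map Prod.snd).sum > 4))).filter
        (fun m => !decide (PySem.List.pyGetD cs m.2 [] = []))).filter
        (fun m => decide ((PySem.List.pyGetD (PySem.List.pyGetD cs m.1 []) (-1) (0, 0)).2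
          + (PySem.List.pyGetD (PySem.List.pyGetD cs m.2 []) (-1) (0, 0)).2 < 4))
      ++ (((valid_moves_function cs).filter (fun m => !decide
        ((PySem.List.pyGetD (PySem.List.pyGetD cs m.1 []) (-1) (0, 0)).2
          + ((PySem.List.pyGetD cs m.2 []).map Prod.snd).sum > 4))).filter
        (fun m => !decide (PySem.List.pyGetD cs m.2 [] = []))).filter
        (fun m => !decide ((PySem.List.pyGetD (PySem.List.pyGetD cs m.1 []) (-1) (0, 0)).2
          + (PySem.List.pyGetD (PySem.List.pyGetD cs m.2 []) (-1) (0, 0)).2 < 4)) := h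
  exact hA.trans hrest

-- ===== VERDICT (by name: the statement is the Claim_ definition above) =====
theorem best_moves_spec : Claim_equal_best_moves := by
  intro cs _
  unfold Spec_best_moves
  exact best_moves_eq cs
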